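-- pv_equiv track=rewrite | github.com/MaximLKorenev/practice | yield.py | long_process
-- ===== SOURCE A (Python) =====
-- def long_process(n):
--     sum = 0
--     for x in range(n):
--         sum += x + 1
--         if x < n - 1:
--             yield
--         else:
--             yield sum
-- ===== SOURCE B (Python) =====
-- def long_process(n):
--     if n >= 1:
--         for _ in range(n - 1):
--             yield None
--         yield n * (n + 1) // 2
-- ===== Notes on version B (the rewrite author's own statement) =====
-- stated objective: simpler
-- what changed: B drops the running accumulator and the per-iteration branch: it yields bare Nones for all but the last step and then yields the triangular sum computed in closed form with integer division, guarded so nonpositive counts yield nothing.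
import Mathlib
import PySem

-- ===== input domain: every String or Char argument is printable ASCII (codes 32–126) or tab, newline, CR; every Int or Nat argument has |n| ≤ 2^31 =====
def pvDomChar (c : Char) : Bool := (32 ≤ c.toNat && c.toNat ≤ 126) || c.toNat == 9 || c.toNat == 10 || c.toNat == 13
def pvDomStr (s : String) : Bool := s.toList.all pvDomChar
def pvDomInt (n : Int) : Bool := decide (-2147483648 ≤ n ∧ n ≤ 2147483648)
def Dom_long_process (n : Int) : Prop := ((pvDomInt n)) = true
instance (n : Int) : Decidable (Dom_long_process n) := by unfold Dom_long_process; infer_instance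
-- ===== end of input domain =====

-- B replaces A's running accumulator and per-iteration branch by n-1 plain None yields
-- followed by the closed-form triangular sum n*(n+1)//2 (objective: simpler).

-- ===== PORT A =====
def long_process (n : Int) : List (Option Int) :=
  ((PySem.List.pyRange 0 n 1).foldl
    (fun (st : Int × List (Option Int)) x =>
      let s := st.1 + (x + 1)
      (s, st.2 ++ [if x < n - 1 then none else some s]))
    (0, [])).2

-- ===== PORT B =====
def long_process_alt (n : Int) : List (Option Int) :=
  if 1 ≤ n then
    (PySem.List.pyRange 0 (n - 1) 1).map (fun _ => none)
      ++ [some (PySem.Int.floordiv (n * (n + 1)) 2)]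
  else []

-- ===== PRECONDITION & SPEC =====
def Spec_long_process (n : Int) (out : List (Option Int)) : Prop := out = long_process_alt n
instance (n : Int) (out : List (Option Int)) : Decidable (Spec_long_process n out) := by unfold Spec_long_process; infer_instance

-- ===== CLAIM (what is proved, stated in full; the proofs are below) =====
def Claim_equal_long_process : Prop := ∀ (n : Int), Dom_long_process n → Spec_long_process n (long_process n)

-- ===== LEMMAS AND PROOFS =====

-- Triangular numbers, used to state the loop invariant without division.
def pvTri : Nat → Nat
  | 0 => 0
  | k + 1 => pvTri k + (k + 1)

-- A's loop body, abstracted for the lemmas below.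
def pvStepA (n : Int) (st : Int × List (Option Int)) (x : Int) : Int × List (Option Int) :=
  let s := st.1 + (x + 1)
  (s, st.2 ++ [if x < n - 1 then none else some s])

-- On the prefix range(0, k) with (k:Int) ≤ n-1 every iteration takes the `yield None`
-- branch and the accumulator reaches s + k(k+1)/2.
lemma pvStepA_prefix (n : Int) :
    ∀ (k : Nat), (k : Int) ≤ n - 1 → ∀ (s : Int) (acc : List (Option Int)),
      (PySem.List.pyRange 0 k 1).foldl (pvStepA n) (s, acc)
        = (s + ((pvTri k : Nat) : Int),
           acc ++ (PySem.List.pyRange 0 k 1).map (fun _ => none)) := by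
  intro k
  induction k with
  | zero =>
    intro _ s acc
    simp
  | succ m ih =>
    intro hk s acc
    have hm : (m : Int) ≤ n - 1 := by push_cast at hk ⊢; omega
    have hsplit : PySem.List.pyRange 0 (((m : Nat) + 1 : Nat) : Int) 1
        = PySem.List.pyRange 0 (m : Int) 1 ++ [(m : Int)] := by
      have := PySem.List.pyRange_one_succ_right (a := 0) (b := (m : Int)) (by positivity)
      simpa using this
    rw [show (((m + 1 : Nat) : Int)) = ((m : Nat) : Int) + 1 by push_cast; ring] at *
    rw [show PySem.List.pyRange 0 ((m : Int) + 1) 1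
          = PySem.List.pyRange 0 (m : Int) 1 ++ [(m : Int)] from
        PySem.List.pyRange_one_succ_right (by positivity)]
    rw [List.foldl_append, ih hm s acc]
    have hlt : (m : Int) < n - 1 := by omega
    simp only [List.foldl_cons, List.foldl_nil, pvStepA, if_pos hlt, List.map_append,
      List.append_assoc, Prod.mk.injEq]
    refine ⟨?_, ?_⟩
    · show s + (pvTri m : Int) + ((m : Int) + 1) = s + ((pvTri (m + 1) : Nat) : Int)
      simp only [pvTri]; push_cast; ring
    · simp

lemma pvTri_double : ∀ k : Nat, pvTri k * 2 = k * (k + 1) := by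
  intro k
  induction k with
  | zero => rfl
  | succ m ih => simp only [pvTri]; rw [Nat.add_mul, ih]; ring

lemma long_process_eq_alt (n : Int) : long_process n = long_process_alt n := by
  by_cases hn : 1 ≤ n
  · have hk : ((n - 1).toNat : Int) = n - 1 := by omega
    have hsplit : PySem.List.pyRange 0 n 1
        = PySem.List.pyRange 0 (n - 1) 1 ++ [n - 1] := by
      have := PySem.List.pyRange_one_succ_right (a := 0) (b := n - 1) (by omega)
      simpa [show n - 1 + 1 = n by ring] using this
    have hpref := pvStepA_prefix n (n - 1).toNat (by omega) 0 []
    rw [hk] at hpref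
    have hT : ((pvTri (n - 1).toNat : Nat) : Int) + n
        = PySem.Int.floordiv (n * (n + 1)) 2 := by
      rw [PySem.Int.floordiv_eq_ediv_of_pos (by norm_num)]
      have hd : ((pvTri (n - 1).toNat : Nat) : Int) * 2 = (n - 1) * n := by
        have := pvTri_double (n - 1).toNat
        have := congrArg (fun m : Nat => (m : Int)) this
        push_cast at this
        rw [hk] at this
        linarith [this]
      have h2 : n * (n + 1) = ((pvTri (n - 1).toNat : Nat) : Int) * 2 + 2 * n := by
        linear_combination -hd
      rw [h2]; omega
    unfold long_process long_process_alt
    rw [hsplit, List.foldl_append]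
    have : (PySem.List.pyRange 0 (n - 1) 1).foldl (pvStepA n) (0, []) =
        (((pvTri (n - 1).toNat : Nat) : Int),
         [] ++ (PySem.List.pyRange 0 (n - 1) 1).map (fun _ => none)) := by
      simpa using hpref
    rw [show (fun (st : Int × List (Option Int)) x =>
          let s := st.1 + (x + 1)
          (s, st.2 ++ [if x < n - 1 then none else some s])) = pvStepA n from rfl]
    rw [this]
    simp only [List.foldl_cons, List.foldl_nil, pvStepA, if_neg (lt_irrefl (n - 1)),
      List.nil_append, if_pos hn]
    rw [show ((pvTri (n - 1).toNat : Nat) : Int) + (n - 1 + 1)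
        = PySem.Int.floordiv (n * (n + 1)) 2 by rw [← hT]; ring]
  · unfold long_process long_process_alt
    rw [PySem.List.pyRange_one_eq_nil (by omega), if_neg hn]
    simp

-- ===== VERDICT (by name: the statement is the Claim_ definition above) =====
theorem long_process_spec : Claim_equal_long_process := by
  intro n _
  exact long_process_eq_alt n
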